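-- pv_equiv track=rewrite | github.com/S-Spence/Coding_Challenges_Python | 2D_Arrays_Matrices/breadth_first_search.py | matrix_traversal_bfs
-- ===== SOURCE A (Python) =====
-- def matrix_traversal_bfs(matrix: "list[int[int]]"):
--     """
--     Traverse a matrix using bfs and return the value of arrays.
--     Space: O(n), Time: O(n) where n is the values in the matrix
--     """
--     # Return an empty array if there are no values in the matrix
--     if len(matrix) == 0:
--         return []
--
--     # Initialize an array of moves for up, right, down, left
--     directions = [[-1, 0], [0, 1], [1, 0], [0, -1]]
--     # Initialize a matrix to track seen values in the original matrix
--     seen_vals = [[0 for col in range(len(matrix[0]))]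
--                  for row in range(len(matrix))]
--
--     """
--     initialize queue. Mention in an interview that a linked list would be more efficient for a queue. However, the array is
--     simpler to do because of the time constraints.
--     """
--     queue = [[0, 0]]
--     values = []
--
--     while len(queue) > 0:
--
--         current_pos = queue.pop(0)
--         # Initialize row and column values for current positions
--         row = current_pos[0]
--         col = current_pos[1]
--         # Ensure we are within bounds and have not seen the value before. Use continue to skip current iteration if not.
--         if row < 0 or col < 0 or row >= len(matrix) or col >= len(matrix[0]) or seen_vals[row][col] == 1:
--             continue
--
--         # Update seen values and push value to output array
--         seen_vals[row][col] = 1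
--         values.append(matrix[row][col])
--
--         # Take the top, right, down, and left elements to add to the queue
--         for move in directions:
--             queue.append([row+move[0], col+move[1]])
--     return values
-- ===== SOURCE B (Python) =====
-- def matrix_traversal_bfs(matrix: "list[int[int]]"):
--     """
--     Same traversal order as the BFS version, computed directly: BFS from the
--     top-left corner visits anti-diagonal d = row+col in increasing d, and within
--     a diagonal in increasing row.  So just enumerate the diagonals.
--     """
--     if len(matrix) == 0:
--         return []
--     rows, cols = len(matrix), len(matrix[0])
--     values = []
--     for d in range(rows + cols - 1):
--         for r in range(max(0, d - (cols - 1)), min(d, rows - 1) + 1):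
--             values.append(matrix[r][d - r])
--     return values
-- ===== Notes on version B (the rewrite author's own statement) =====
-- stated objective: faster
-- what changed: Replaces the queue/seen-matrix BFS with a direct anti-diagonal sweep: BFS from (0,0) emits cells in increasing row+col and, within a diagonal, increasing row, so B enumerates the diagonals with two closed-form loops (no queue, no seen matrix, no bounds-skip iterations).
import Mathlib
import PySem

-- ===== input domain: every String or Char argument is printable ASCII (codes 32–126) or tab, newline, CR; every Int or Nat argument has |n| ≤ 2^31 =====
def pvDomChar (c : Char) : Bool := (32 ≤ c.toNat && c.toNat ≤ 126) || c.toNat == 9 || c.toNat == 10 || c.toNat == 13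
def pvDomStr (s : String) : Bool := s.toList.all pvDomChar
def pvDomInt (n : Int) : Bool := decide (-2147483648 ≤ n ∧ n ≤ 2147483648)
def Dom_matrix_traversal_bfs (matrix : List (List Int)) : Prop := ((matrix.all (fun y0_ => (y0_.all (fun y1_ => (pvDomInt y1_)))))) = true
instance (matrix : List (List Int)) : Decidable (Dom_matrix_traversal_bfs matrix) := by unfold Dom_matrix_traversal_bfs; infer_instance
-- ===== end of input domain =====

-- B replaces A's queue/seen-matrix BFS by a direct anti-diagonal sweep (same emission order, no queue).

-- ===== PORT A =====
-- seen_vals[row][col] read/write and matrix[row][col] read; indices are checked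
-- non-negative and in range by the loop guard before these are reached, where
-- getD with toNat is exact Python indexing.
def pvSeenGet (seen : List (List Int)) (r c : Int) : Int :=
  (seen.getD r.toNat []).getD c.toNat 0

def pvSeenSet (seen : List (List Int)) (r c : Int) : List (List Int) :=
  seen.set r.toNat ((seen.getD r.toNat []).set c.toNat 1)

def pvMatGet (m : List (List Int)) (r c : Int) : Int :=
  (m.getD r.toNat []).getD c.toNat 0

-- the while loop; fuel is a totalization guard only (chosen large enough that it
-- is never exhausted on any input, as the proof shows)
def pvBfsLoop (m : List (List Int)) : Nat → List (Int × Int) → List (List Int) → List Int → List Int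
  | 0, _, _, values => values
  | _ + 1, [], _, values => values
  | fuel + 1, (row, col) :: rest, seen, values =>
    if row < 0 ∨ col < 0 ∨ (m.length : Int) ≤ row ∨ ((m.headD []).length : Int) ≤ col ∨
        pvSeenGet seen row col = 1 then
      pvBfsLoop m fuel rest seen values
    else
      pvBfsLoop m fuel
        (rest ++ [(row - 1, col), (row, col + 1), (row + 1, col), (row, col - 1)])
        (pvSeenSet seen row col) (values ++ [pvMatGet m row col])

def matrix_traversal_bfs (matrix : List (List Int)) : List Int :=
  if matrix.length = 0 then []
  else
    pvBfsLoop matrix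
      (1 + 4 * ((matrix.length + (matrix.headD []).length) *
        (2 * (matrix.length + (matrix.headD []).length)) + matrix.length))
      [((0 : Int), (0 : Int))]
      ((List.range matrix.length).map (fun _ => (List.range (matrix.headD []).length).map (fun _ => (0 : Int))))
      []

-- ===== PORT B =====
def matrix_traversal_bfs_alt (matrix : List (List Int)) : List Int :=
  if matrix.length = 0 then []
  else
    let rows : Int := matrix.length
    let cols : Int := (matrix.headD []).length
    (PySem.List.pyRange 0 (rows + cols - 1) 1).foldl
      (fun values d =>
        (PySem.List.pyRange (max 0 (d - (cols - 1))) (min d (rows - 1) + 1) 1).foldl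
          (fun values r => values ++ [pvMatGet matrix r (d - r)]) values)
      []

-- ===== PRECONDITION & SPEC =====
-- Pre_ excludes exactly the jagged matrices having a row shorter than row 0: there
-- Python A (and B alike) raises IndexError when the BFS reaches the missing cell.
def Pre_matrix_traversal_bfs (matrix : List (List Int)) : Prop :=
  ∀ row ∈ matrix, (matrix.headD []).length ≤ row.length
instance (matrix : List (List Int)) : Decidable (Pre_matrix_traversal_bfs matrix) := by
  unfold Pre_matrix_traversal_bfs; infer_instance

def pvWitness_matrix_traversal_bfs : List (List Int) := [[1, 2], [3, 4]]

def Spec_matrix_traversal_bfs (matrix : List (List Int)) (out : List Int) : Prop := out = matrix_traversal_bfs_alt matrix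
instance (matrix : List (List Int)) (out : List Int) : Decidable (Spec_matrix_traversal_bfs matrix out) := by unfold Spec_matrix_traversal_bfs; infer_instance

-- ===== CLAIM (what is proved, stated in full; the proofs are below) =====
def Claim_equal_matrix_traversal_bfs : Prop := ∀ (matrix : List (List Int)), Dom_matrix_traversal_bfs matrix → Pre_matrix_traversal_bfs matrix → Spec_matrix_traversal_bfs matrix (matrix_traversal_bfs matrix)

-- ===== LEMMAS AND PROOFS =====

-- Diagonal bookkeeping: diagonal d occupies rows [pvLo C d, pvHi R d] of the grid.
def pvLo (C d : Nat) : Nat := d + 1 - C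
def pvHi (R d : Nat) : Nat := min d (R - 1)

-- while consuming the child blocks of diagonal d with block a at the queue front,
-- rows [pvLo C (d+1), pvRho R C d a) of diagonal d+1 have already been visited
def pvRho (R C d a : Nat) : Nat := if a = pvLo C d then pvLo C (d + 1) else min (a + 1) R

-- the four cells pushed when (r, d-r) is visited
def pvBlock (d r : Nat) : List (Int × Int) :=
  [((r : Int) - 1, (d : Int) - (r : Int)), ((r : Int), (d : Int) - (r : Int) + 1),
   ((r : Int) + 1, (d : Int) - (r : Int)), ((r : Int), (d : Int) - (r : Int) - 1)]

def pvVal (m : List (List Int)) (d r : Nat) : Int := (m.getD r []).getD (d - r) 0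

def pvDiagVals (m : List (List Int)) (R C d : Nat) : List Int :=
  (List.range' (pvLo C d) (pvHi R d + 1 - pvLo C d)).map (pvVal m d)

def pvDiagsFrom (m : List (List Int)) (R C e : Nat) : List Int :=
  (List.range' e (R + C - 1 - e)).flatMap (pvDiagVals m R C)

def pvQueue (R C d a : Nat) : List (Int × Int) :=
  (List.range' a (pvHi R d + 1 - a)).flatMap (pvBlock d) ++
  (List.range' (pvLo C (d + 1)) (pvRho R C d a - pvLo C (d + 1))).flatMap (pvBlock (d + 1))

def pvPr (d rho i j : Nat) : Bool :=
  decide (i + j ≤ d) || (decide (i + j = d + 1) && decide (i < rho))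

def pvP (R C d a : Nat) : Nat → Nat → Bool := pvPr d (pvRho R C d a)

def pvSeenInv (R C : Nat) (seen : List (List Int)) (P : Nat → Nat → Bool) : Prop :=
  seen.length = R ∧ (∀ i, i < R → (seen.getD i []).length = C) ∧
  (∀ i j, i < R → j < C → (seen.getD i []).getD j 0 = if P i j then 1 else 0)

def pvMu (R C d a : Nat) : Nat := (R + C - 1 - d) * (2 * (R + C)) + (pvHi R d + 1 - a)

lemma pvBfsLoop_nil (m : List (List Int)) (fuel : Nat) (seen : List (List Int)) (values : List Int) :
    pvBfsLoop m fuel [] seen values = values := by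
  cases fuel <;> rfl

lemma pvBfsLoop_cons (m : List (List Int)) (fuel : Nat) (row col : Int)
    (rest : List (Int × Int)) (seen : List (List Int)) (values : List Int) :
    pvBfsLoop m (fuel + 1) ((row, col) :: rest) seen values =
      if row < 0 ∨ col < 0 ∨ (m.length : Int) ≤ row ∨ ((m.headD []).length : Int) ≤ col ∨
          pvSeenGet seen row col = 1 then
        pvBfsLoop m fuel rest seen values
      else
        pvBfsLoop m fuel
          (rest ++ [(row - 1, col), (row, col + 1), (row + 1, col), (row, col - 1)])
          (pvSeenSet seen row col) (values ++ [pvMatGet m row col]) := rfl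

lemma pvSeenGet_inv {R C : Nat} {seen : List (List Int)} {P : Nat → Nat → Bool}
    (h : pvSeenInv R C seen P) (i j : Nat) (hi : i < R) (hj : j < C) :
    pvSeenGet seen (i : Int) (j : Int) = if P i j then 1 else 0 := by
  have := h.2.2 i j hi hj
  simpa [pvSeenGet] using this

lemma pvSeenInv_set {R C : Nat} {seen : List (List Int)} {P : Nat → Nat → Bool}
    (h : pvSeenInv R C seen P) (i0 j0 : Nat) (h1 : i0 < R) (h2 : j0 < C) :
    pvSeenInv R C (pvSeenSet seen (i0 : Int) (j0 : Int))
      (fun i j => (i == i0 && j == j0) || P i j) := by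
  obtain ⟨hlen, hrow, hget⟩ := h
  have hi0 : i0 < seen.length := by omega
  have hset : pvSeenSet seen (i0 : Int) (j0 : Int) = seen.set i0 (seen[i0].set j0 1) := by
    simp [pvSeenSet, List.getD, List.getElem?_eq_getElem hi0]
  have hrowlen : ∀ i (hi : i < seen.length), seen[i].length = C := by
    intro i hi
    have := hrow i (by omega)
    rwa [List.getD_eq_getElem seen [] hi] at this
  have hcell : ∀ i j (hi : i < seen.length) (hj : j < C),
      seen[i].getD j 0 = if P i j then 1 else 0 := by
    intro i j hi hj
    have := hget i j (by omega) hj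
    rwa [List.getD_eq_getElem seen [] hi] at this
  refine ⟨by simp [hset, hlen], ?_, ?_⟩
  · intro i hiR
    have hi : i < seen.length := by omega
    rw [hset, List.getD_eq_getElem _ [] (by simpa using hi), List.getElem_set]
    split
    · simp [hrowlen i0 hi0]
    · exact hrowlen i hi
  · intro i j hiR hjC
    have hi : i < seen.length := by omega
    rw [hset, List.getD_eq_getElem _ [] (by simpa using hi), List.getElem_set]
    by_cases hii : i0 = i
    · subst hii
      have hj0 : j0 < seen[i0].length := by rw [hrowlen i0 hi0]; omega
      have hj : j < seen[i0].length := by rw [hrowlen i0 hi0]; omega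
      rw [if_pos rfl, List.getD_eq_getElem _ 0 (by simpa using hj), List.getElem_set]
      by_cases hjj : j0 = j
      · subst hjj; simp
      · rw [if_neg hjj, ← List.getD_eq_getElem seen[i0] 0 hj, hcell i0 j hi0 hjC]
        have hne : ¬ j = j0 := fun h => hjj h.symm
        simp [hne]
    · rw [if_neg hii, hcell i j hi hjC]
      have hne : ¬ i = i0 := fun h => hii h.symm
      have : (i == i0 && j == j0) = false := by simp [hne]
      simp [this]

lemma pvSeenInv_congr {R C : Nat} {seen : List (List Int)} {P Q : Nat → Nat → Bool}
    (h : pvSeenInv R C seen P) (hPQ : ∀ i j, i < R → j < C → P i j = Q i j) :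
    pvSeenInv R C seen Q := by
  obtain ⟨h1, h2, h3⟩ := h
  exact ⟨h1, h2, fun i j hi hj => by rw [h3 i j hi hj, hPQ i j hi hj]⟩

lemma pvDiagVals_nil (m : List (List Int)) (R C e : Nat) (hR1 : 1 ≤ R) (he : R + C - 1 ≤ e) :
    pvDiagVals m R C e = [] := by
  have : pvHi R e + 1 - pvLo C e = 0 := by unfold pvHi pvLo; omega
  simp [pvDiagVals, this]

lemma pvDiagsFrom_succ (m : List (List Int)) (R C e : Nat) (hR1 : 1 ≤ R) :
    pvDiagsFrom m R C e = pvDiagVals m R C e ++ pvDiagsFrom m R C (e + 1) := by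
  by_cases he : e < R + C - 1
  · have h1 : R + C - 1 - e = (R + C - 1 - (e + 1)) + 1 := by omega
    rw [pvDiagsFrom, h1, List.range'_succ, List.flatMap_cons]
    rfl
  · have h0 : R + C - 1 - e = 0 := by omega
    have h0' : R + C - 1 - (e + 1) = 0 := by omega
    rw [pvDiagsFrom, pvDiagsFrom, h0, h0', pvDiagVals_nil m R C e hR1 (by omega)]
    rfl

lemma pvRho_v2 {R C d a : Nat} (hv2 : a = pvLo C d ∧ pvLo C (d + 1) ≤ a) :
    pvRho R C d a = a := by
  have hmono : pvLo C d ≤ pvLo C (d + 1) := by unfold pvLo; omega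
  rw [pvRho, if_pos hv2.1]
  omega

lemma pvRho_nv2 {R C d a : Nat} (hlo : pvLo C d ≤ a) (haR : a + 1 ≤ R)
    (hv2 : ¬(a = pvLo C d ∧ pvLo C (d + 1) ≤ a)) : pvRho R C d a = a + 1 := by
  have hmono1 : pvLo C (d + 1) ≤ pvLo C d + 1 := by unfold pvLo; omega
  by_cases he : a = pvLo C d
  · rw [pvRho, if_pos he]
    have : ¬ pvLo C (d + 1) ≤ a := fun h => hv2 ⟨he, h⟩
    omega
  · rw [pvRho, if_neg he]
    omega

lemma pvRho_succ {R C d a : Nat} (hlo : pvLo C d ≤ a) :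
    pvRho R C d (a + 1) = min (a + 2) R := by
  rw [pvRho, if_neg (by omega)]

-- processing the last two cells of the block of parent a, then the rest of the queue
lemma pvTail (m : List (List Int)) (R C : Nat) (hR : R = m.length) (hC : C = (m.headD []).length)
    (hR1 : 1 ≤ R) (hC1 : 1 ≤ C) (N : Nat)
    (ih : ∀ d a fuel seen values, pvLo C d ≤ a → a ≤ pvHi R d + 1 → d ≤ R + C - 2 →
      pvMu R C d a ≤ N → 4 * pvMu R C d a ≤ fuel →
      pvSeenInv R C seen (pvP R C d a) →
      pvBfsLoop m fuel (pvQueue R C d a) seen values =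
        values ++ (List.range' (pvRho R C d a) (pvHi R (d + 1) + 1 - pvRho R C d a)).map (pvVal m (d + 1))
          ++ pvDiagsFrom m R C (d + 2))
    (d a f : Nat) (seen2 : List (List Int)) (values : List Int)
    (hlo : pvLo C d ≤ a) (hcase : a ≤ pvHi R d) (hd : d ≤ R + C - 2)
    (hmu : pvMu R C d a ≤ N + 1) (hfuel : 4 * pvMu R C d a ≤ f + 4)
    (v2 : Bool) (hv2 : v2 = true ↔ (a = pvLo C d ∧ pvLo C (d + 1) ≤ a))
    (hseen2 : pvSeenInv R C seen2 (pvPr d (a + 1))) :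
    pvBfsLoop m (f + 2)
      ((((a : Int)) + 1, (d : Int) - (a : Int)) :: (((a : Int)), (d : Int) - (a : Int) - 1) ::
        ((List.range' (a + 1) (pvHi R d - a)).flatMap (pvBlock d) ++
         (List.range' (pvLo C (d + 1)) (pvRho R C d a - pvLo C (d + 1))).flatMap (pvBlock (d + 1)) ++
         (if v2 then pvBlock (d + 1) a else [])))
      seen2
      (values ++ (if v2 then [pvVal m (d + 1) a] else [])) =
    values ++ (List.range' (pvRho R C d a) (pvHi R (d + 1) + 1 - pvRho R C d a)).map (pvVal m (d + 1))
      ++ pvDiagsFrom m R C (d + 2) := by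
  have haR : a + 1 ≤ R := by unfold pvHi at hcase; omega
  have had : a ≤ d := by unfold pvHi at hcase; omega
  have hdaC : d + 1 ≤ a + C := by unfold pvLo at hlo; omega
  have hrho_a : pvRho R C d a = if v2 then a else a + 1 := by
    cases hb : v2
    · simp only [if_neg (Bool.false_ne_true)]
      exact pvRho_nv2 hlo haR (fun h => by simp [hv2.mpr h] at hb)
    · simpa using pvRho_v2 (hv2.mp hb)
  have hrho_a1 : pvRho R C d (a + 1) = min (a + 2) R := pvRho_succ hlo
  have hlo_le : pvLo C (d + 1) ≤ pvRho R C d a := by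
    have hmono : pvLo C d ≤ pvLo C (d + 1) := by unfold pvLo; omega
    have hmono1 : pvLo C (d + 1) ≤ pvLo C d + 1 := by unfold pvLo; omega
    rw [hrho_a]
    cases hb : v2
    · simp; omega
    · simp [(hv2.mp hb).2]
  -- pop 3: the cell (a+1, d-a) of diagonal d+1
  rw [show f + 2 = (f + 1) + 1 from rfl, pvBfsLoop_cons]
  by_cases hv3 : a + 2 ≤ R
  case pos =>
    have e1 : (a : Int) + 1 = ((a + 1 : Nat) : Int) := by omega
    have e2 : (d : Int) - (a : Int) = ((d - a : Nat) : Int) := by omega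
    have hP3 : pvPr d (a + 1) (a + 1) (d - a) = false := by
      simp [pvPr]; omega
    rw [if_neg (by
      push Not
      refine ⟨by omega, by omega, by rw [← hR]; omega, by rw [← hC]; omega, ?_⟩
      rw [e1, e2, pvSeenGet_inv hseen2 (a + 1) (d - a) (by omega) (by omega), hP3]
      simp)]
    rw [e1, e2]
    have hblk3 : [(((a + 1 : Nat) : Int) - 1, ((d - a : Nat) : Int)),
        (((a + 1 : Nat) : Int), ((d - a : Nat) : Int) + 1),
        (((a + 1 : Nat) : Int) + 1, ((d - a : Nat) : Int)),
        (((a + 1 : Nat) : Int), ((d - a : Nat) : Int) - 1)] = pvBlock (d + 1) (a + 1) := by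
      rw [show ((d - a : Nat) : Int) = ((d + 1 : Nat) : Int) - ((a + 1 : Nat) : Int) from by omega]
      rfl
    rw [hblk3]
    have hval3 : pvMatGet m ((a + 1 : Nat) : Int) ((d - a : Nat) : Int) = pvVal m (d + 1) (a + 1) := by
      unfold pvMatGet pvVal
      rw [show (((a + 1 : Nat) : Int)).toNat = a + 1 from by omega,
        show (((d - a : Nat) : Int)).toNat = d + 1 - (a + 1) from by omega]
    rw [hval3]
    have hseen3 : pvSeenInv R C (pvSeenSet seen2 ((a + 1 : Nat) : Int) ((d - a : Nat) : Int))
        (pvPr d (min (a + 2) R)) := by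
      refine pvSeenInv_congr (pvSeenInv_set hseen2 (a + 1) (d - a) (by omega) (by omega)) ?_
      intro i j hi hj
      apply Bool.eq_iff_iff.mpr
      simp only [pvPr, Bool.or_eq_true, Bool.and_eq_true, decide_eq_true_eq, beq_iff_eq]
      omega
    -- pop 4: the cell (a, d-a-1) of diagonal d-1 is skipped
    rw [List.cons_append, pvBfsLoop_cons]
    rw [if_pos (by
      by_cases had2 : a = d
      · right; left; omega
      · right; right; right; right
        rw [show ((d - a : Nat) : Int) - 1 = ((d - a - 1 : Nat) : Int) from by omega,
          pvSeenGet_inv hseen3 a (d - a - 1) (by omega) (by omega),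
          if_pos (show pvPr d (min (a + 2) R) a (d - a - 1) = true from by simp [pvPr]; omega)])]
    -- assemble the new state and apply the induction hypothesis
    have hseen4 : pvSeenInv R C (pvSeenSet seen2 ((a + 1 : Nat) : Int) ((d - a : Nat) : Int))
        (pvP R C d (a + 1)) := by
      rwa [show pvPr d (min (a + 2) R) = pvP R C d (a + 1) from by unfold pvP; rw [hrho_a1]] at hseen3
    have hmu' : pvMu R C d (a + 1) + 1 = pvMu R C d a := by
      unfold pvMu pvHi
      generalize (R + C - 1 - d) * (2 * (R + C)) = p
      unfold pvHi at hcase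
      omega
    have hhi' : pvHi R (d + 1) + 1 = min (d + 2) R := by unfold pvHi; omega
    have hrmin : pvRho R C d (a + 1) = a + 2 := by rw [hrho_a1]; omega
    have hlo1 : pvLo C d ≤ a + 1 := by omega
    have hhi1 : a + 1 ≤ pvHi R d + 1 := by omega
    have hmu1 : pvMu R C d (a + 1) ≤ N := by omega
    have hfuel1 : 4 * pvMu R C d (a + 1) ≤ f := by omega
    by_cases hb : v2 = true
    · -- v2 = true: rows a and a+1 of diagonal d+1 were both added
      have hra : pvRho R C d a = a := by rw [hrho_a, if_pos hb]
      rw [hra] at hlo_le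
      simp only [if_pos hb]
      rw [hra]
      have hQ : (List.range' (a + 1) (pvHi R d - a)).flatMap (pvBlock d) ++
          (List.range' (pvLo C (d + 1)) (a - pvLo C (d + 1))).flatMap (pvBlock (d + 1)) ++
          pvBlock (d + 1) a ++ pvBlock (d + 1) (a + 1) = pvQueue R C d (a + 1) := by
        rw [pvQueue, hrmin, show pvHi R d + 1 - (a + 1) = pvHi R d - a from by omega,
          show a + 2 - pvLo C (d + 1) = (a - pvLo C (d + 1)) + 2 from by omega,
          ← List.range'_append,
          show pvLo C (d + 1) + 1 * (a - pvLo C (d + 1)) = a from by omega,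
          show List.range' a 2 = [a, a + 1] from rfl]
        simp [List.flatMap_append, List.append_assoc]
      rw [show ((List.range' (a + 1) (pvHi R d - a)).flatMap (pvBlock d) ++
          (List.range' (pvLo C (d + 1)) (a - pvLo C (d + 1))).flatMap (pvBlock (d + 1)) ++
          pvBlock (d + 1) a) ++ pvBlock (d + 1) (a + 1) = pvQueue R C d (a + 1) from by
        rw [← hQ]]
      rw [ih d (a + 1) f _ _ hlo1 hhi1 hd hmu1 hfuel1 hseen4, hrmin]
      rw [show pvHi R (d + 1) + 1 - a = 2 + (pvHi R (d + 1) + 1 - (a + 2)) from by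
          rw [hhi']; omega,
        ← List.range'_append, show a + 1 * 2 = a + 2 from by omega,
        show List.range' a 2 = [a, a + 1] from rfl, List.map_append]
      simp [List.append_assoc]
    · -- v2 = false: only row a+1 of diagonal d+1 was added
      have hra : pvRho R C d a = a + 1 := by rw [hrho_a, if_neg hb]
      rw [hra] at hlo_le
      simp only [if_neg hb, List.append_nil]
      rw [hra]
      have hQ : (List.range' (a + 1) (pvHi R d - a)).flatMap (pvBlock d) ++
          (List.range' (pvLo C (d + 1)) (a + 1 - pvLo C (d + 1))).flatMap (pvBlock (d + 1)) ++
          pvBlock (d + 1) (a + 1) = pvQueue R C d (a + 1) := by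
        rw [pvQueue, hrmin, show pvHi R d + 1 - (a + 1) = pvHi R d - a from by omega,
          show a + 2 - pvLo C (d + 1) = (a + 1 - pvLo C (d + 1)) + 1 from by omega,
          ← List.range'_append,
          show pvLo C (d + 1) + 1 * (a + 1 - pvLo C (d + 1)) = a + 1 from by omega,
          show List.range' (a + 1) 1 = [a + 1] from rfl]
        simp [List.flatMap_append, List.append_assoc]
      rw [hQ, ih d (a + 1) f _ _ hlo1 hhi1 hd hmu1 hfuel1 hseen4, hrmin]
      rw [show pvHi R (d + 1) + 1 - (a + 1) = 1 + (pvHi R (d + 1) + 1 - (a + 2)) from by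
          rw [hhi']; omega,
        ← List.range'_append, show a + 1 + 1 * 1 = a + 2 from by omega,
        show List.range' (a + 1) 1 = [a + 1] from rfl, List.map_append]
      simp [List.append_assoc]
  case neg =>
    have hg : (R : Int) ≤ (a : Int) + 1 := by omega
    rw [if_pos (by right; right; left; rw [← hR]; exact hg)]
    -- pop 4: the cell (a, d-a-1) of diagonal d-1 is skipped
    rw [pvBfsLoop_cons]
    rw [if_pos (by
      by_cases had2 : a = d
      · right; left; omega
      · right; right; right; right
        rw [show (d : Int) - (a : Int) - 1 = ((d - a - 1 : Nat) : Int) from by omega,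
          pvSeenGet_inv hseen2 a (d - a - 1) (by omega) (by omega),
          if_pos (show pvPr d (a + 1) a (d - a - 1) = true from by simp [pvPr]; omega)])]
    have hseen4 : pvSeenInv R C seen2 (pvP R C d (a + 1)) := by
      rwa [show pvPr d (a + 1) = pvP R C d (a + 1) from by
        unfold pvP; rw [hrho_a1, show min (a + 2) R = a + 1 from by omega]] at hseen2
    have hmu' : pvMu R C d (a + 1) + 1 = pvMu R C d a := by
      unfold pvMu pvHi
      generalize (R + C - 1 - d) * (2 * (R + C)) = p
      unfold pvHi at hcase
      omega
    have hhi' : pvHi R (d + 1) + 1 = min (d + 2) R := by unfold pvHi; omega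
    have hrmin : pvRho R C d (a + 1) = a + 1 := by rw [hrho_a1]; omega
    have hlo1 : pvLo C d ≤ a + 1 := by omega
    have hhi1 : a + 1 ≤ pvHi R d + 1 := by omega
    have hmu1 : pvMu R C d (a + 1) ≤ N := by omega
    have hfuel1 : 4 * pvMu R C d (a + 1) ≤ f := by omega
    by_cases hb : v2 = true
    · have hra : pvRho R C d a = a := by rw [hrho_a, if_pos hb]
      rw [hra] at hlo_le
      simp only [if_pos hb]
      rw [hra]
      have hQ : (List.range' (a + 1) (pvHi R d - a)).flatMap (pvBlock d) ++
          (List.range' (pvLo C (d + 1)) (a - pvLo C (d + 1))).flatMap (pvBlock (d + 1)) ++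
          pvBlock (d + 1) a = pvQueue R C d (a + 1) := by
        rw [pvQueue, hrmin, show pvHi R d + 1 - (a + 1) = pvHi R d - a from by omega,
          show a + 1 - pvLo C (d + 1) = (a - pvLo C (d + 1)) + 1 from by omega,
          ← List.range'_append,
          show pvLo C (d + 1) + 1 * (a - pvLo C (d + 1)) = a from by omega,
          show List.range' a 1 = [a] from rfl]
        simp [List.flatMap_append, List.append_assoc]
      rw [hQ, ih d (a + 1) f _ _ hlo1 hhi1 hd hmu1 hfuel1 hseen4, hrmin]
      rw [show pvHi R (d + 1) + 1 - a = 1 + (pvHi R (d + 1) + 1 - (a + 1)) from by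
          rw [hhi']; omega,
        ← List.range'_append, show a + 1 * 1 = a + 1 from by omega,
        show List.range' a 1 = [a] from rfl, List.map_append]
      simp [List.append_assoc]
    · have hra : pvRho R C d a = a + 1 := by rw [hrho_a, if_neg hb]
      simp only [if_neg hb, List.append_nil]
      rw [hra]
      have hQ : (List.range' (a + 1) (pvHi R d - a)).flatMap (pvBlock d) ++
          (List.range' (pvLo C (d + 1)) (a + 1 - pvLo C (d + 1))).flatMap (pvBlock (d + 1))
          = pvQueue R C d (a + 1) := by
        rw [pvQueue, hrmin, show pvHi R d + 1 - (a + 1) = pvHi R d - a from by omega]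
      rw [hQ, ih d (a + 1) f _ _ hlo1 hhi1 hd hmu1 hfuel1 hseen4, hrmin]

-- the main loop invariant
lemma pvStep (m : List (List Int)) (R C : Nat) (hR : R = m.length) (hC : C = (m.headD []).length)
    (hR1 : 1 ≤ R) (hC1 : 1 ≤ C) :
    ∀ N d a fuel seen values, pvLo C d ≤ a → a ≤ pvHi R d + 1 → d ≤ R + C - 2 →
      pvMu R C d a ≤ N → 4 * pvMu R C d a ≤ fuel →
      pvSeenInv R C seen (pvP R C d a) →
      pvBfsLoop m fuel (pvQueue R C d a) seen values =
        values ++ (List.range' (pvRho R C d a) (pvHi R (d + 1) + 1 - pvRho R C d a)).map (pvVal m (d + 1))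
          ++ pvDiagsFrom m R C (d + 2) := by
  intro N
  induction N with
  | zero =>
    intro d a fuel seen values hlo hhi hd hmu hfuel hseen
    exfalso
    have h1 : 1 ≤ R + C - 1 - d := by omega
    have h2 : 1 * (2 * (R + C)) ≤ (R + C - 1 - d) * (2 * (R + C)) :=
      Nat.mul_le_mul_right _ h1
    unfold pvMu at hmu
    omega
  | succ N ih =>
    intro d a fuel seen values hlo hhi hd hmu hfuel hseen
    by_cases hcase : a ≤ pvHi R d
    · -- the block of parent a is at the front of the queue: four pops
      have haR : a + 1 ≤ R := by unfold pvHi at hcase; omega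
      have had : a ≤ d := by unfold pvHi at hcase; omega
      have hdaC : d + 1 ≤ a + C := by unfold pvLo at hlo; omega
      have hmu4 : 1 ≤ pvMu R C d a := by
        unfold pvMu pvHi
        generalize (R + C - 1 - d) * (2 * (R + C)) = p
        unfold pvHi at hcase
        omega
      obtain ⟨f, rfl⟩ : ∃ f, fuel = f + 4 := ⟨fuel - 4, by omega⟩
      have hq : pvQueue R C d a = ((a : Int) - 1, (d : Int) - (a : Int)) ::
          ((a : Int), (d : Int) - (a : Int) + 1) ::
          ((a : Int) + 1, (d : Int) - (a : Int)) :: ((a : Int), (d : Int) - (a : Int) - 1) ::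
          ((List.range' (a + 1) (pvHi R d - a)).flatMap (pvBlock d) ++
           (List.range' (pvLo C (d + 1)) (pvRho R C d a - pvLo C (d + 1))).flatMap (pvBlock (d + 1))) := by
        rw [pvQueue, show pvHi R d + 1 - a = (pvHi R d - a) + 1 from by omega,
          List.range'_succ, List.flatMap_cons]
        simp only [pvBlock, List.cons_append, List.nil_append]
      rw [hq]
      -- pop 1: (a-1, d-a) lies on diagonal d-1 (or above the grid): skipped
      rw [show f + 4 = (f + 3) + 1 from rfl, pvBfsLoop_cons]
      rw [if_pos (by
        by_cases ha0 : a = 0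
        · left; omega
        · right; right; right; right
          rw [show (a : Int) - 1 = ((a - 1 : Nat) : Int) from by omega,
            show (d : Int) - (a : Int) = ((d - a : Nat) : Int) from by omega,
            pvSeenGet_inv hseen (a - 1) (d - a) (by omega) (by omega),
            if_pos (show pvP R C d a (a - 1) (d - a) = true from by
              simp only [pvP, pvPr, Bool.or_eq_true, Bool.and_eq_true, decide_eq_true_eq]
              omega)])]
      -- pop 2: (a, d-a+1) lies on diagonal d+1; visited iff a = lo d and its column is in range
      rw [show f + 3 = (f + 2) + 1 from rfl, pvBfsLoop_cons]
      by_cases hv2 : a = pvLo C d ∧ pvLo C (d + 1) ≤ a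
      · have hrho : pvRho R C d a = a := pvRho_v2 hv2
        have h2 := hv2.2
        unfold pvLo at h2
        rw [if_neg (by
          push Not
          refine ⟨by omega, by omega, by rw [← hR]; omega, by rw [← hC]; omega, ?_⟩
          rw [show (d : Int) - (a : Int) + 1 = ((d - a + 1 : Nat) : Int) from by omega,
            pvSeenGet_inv hseen a (d - a + 1) (by omega) (by omega),
            show pvP R C d a a (d - a + 1) = false from Bool.eq_false_iff.mpr (by
              intro hcontra
              simp only [pvP, pvPr, hrho, Bool.or_eq_true, Bool.and_eq_true,
                decide_eq_true_eq] at hcontra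
              omega)]
          simp)]
        have hblk2 : [((a : Int) - 1, (d : Int) - (a : Int) + 1),
            ((a : Int), (d : Int) - (a : Int) + 1 + 1),
            ((a : Int) + 1, (d : Int) - (a : Int) + 1),
            ((a : Int), (d : Int) - (a : Int) + 1 - 1)] = pvBlock (d + 1) a := by
          rw [show (d : Int) - (a : Int) + 1 = ((d + 1 : Nat) : Int) - (a : Int) from by push_cast; ring]
          rfl
        have hval2 : pvMatGet m ((a : Int)) ((d : Int) - (a : Int) + 1) = pvVal m (d + 1) a := by
          unfold pvMatGet pvVal
          rw [show ((a : Int)).toNat = a from by omega,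
            show ((d : Int) - (a : Int) + 1).toNat = d + 1 - a from by omega]
        have hseen2 : pvSeenInv R C (pvSeenSet seen ((a : Int)) ((d : Int) - (a : Int) + 1))
            (pvPr d (a + 1)) := by
          rw [show (d : Int) - (a : Int) + 1 = ((d - a + 1 : Nat) : Int) from by omega]
          refine pvSeenInv_congr (pvSeenInv_set hseen a (d - a + 1) (by omega) (by omega)) ?_
          intro i j hi hj
          apply Bool.eq_iff_iff.mpr
          simp only [pvP, pvPr, hrho, Bool.or_eq_true, Bool.and_eq_true, decide_eq_true_eq,
            beq_iff_eq]
          omega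
        rw [hblk2, hval2]
        simp only [List.cons_append]
        have ht := pvTail m R C hR hC hR1 hC1 N ih d a f _ values hlo hcase hd hmu
          hfuel true ⟨fun _ => hv2, fun _ => rfl⟩ hseen2
        simp only [reduceIte] at ht
        exact ht
      · rw [if_pos (by
          by_cases hcol : pvLo C (d + 1) ≤ a
          · right; right; right; right
            have hrho : pvRho R C d a = a + 1 := pvRho_nv2 hlo haR hv2
            have h2 := hcol
            unfold pvLo at h2
            rw [show (d : Int) - (a : Int) + 1 = ((d - a + 1 : Nat) : Int) from by omega,
              pvSeenGet_inv hseen a (d - a + 1) (by omega) (by omega),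
              if_pos (show pvP R C d a a (d - a + 1) = true from by
                simp only [pvP, pvPr, hrho, Bool.or_eq_true, Bool.and_eq_true, decide_eq_true_eq]
                omega)]
          · right; right; right; left
            rw [← hC]
            unfold pvLo at hcol
            omega)]
        have ht := pvTail m R C hR hC hR1 hC1 N ih d a f seen values hlo hcase hd hmu
          hfuel false ⟨fun h => absurd h (by simp), fun h => absurd h hv2⟩
          (by
            refine pvSeenInv_congr hseen ?_
            intro i j hi hj
            apply Bool.eq_iff_iff.mpr
            simp only [pvP, pvPr, pvRho_nv2 hlo haR hv2, Bool.or_eq_true, Bool.and_eq_true,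
              decide_eq_true_eq]
          )
        rw [if_neg Bool.false_ne_true, if_neg Bool.false_ne_true, List.append_nil,
          List.append_nil] at ht
        exact ht
    · -- the whole block of diagonal d has been consumed
      have ha : a = pvHi R d + 1 := by omega
      have hQempty1 : pvHi R d + 1 - a = 0 := by omega
      have hane : a ≠ pvLo C d := by
        have : pvLo C d ≤ pvHi R d := by unfold pvLo pvHi; omega
        omega
      have hrho : pvRho R C d a = min (d + 2) R := by
        rw [pvRho, if_neg hane, ha]
        unfold pvHi
        omega
      have hhi' : pvHi R (d + 1) + 1 = min (d + 2) R := by unfold pvHi; omega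
      by_cases hD : d + 1 ≤ R + C - 2
      · -- diagonal boundary: the state is exactly the start state of diagonal d+1
        have hrho1 : pvRho R C (d + 1) (pvLo C (d + 1)) = pvLo C (d + 2) := by
          rw [pvRho, if_pos rfl]
        have hq : pvQueue R C d a = pvQueue R C (d + 1) (pvLo C (d + 1)) := by
          rw [pvQueue, pvQueue, hQempty1, hrho, hrho1, hhi', Nat.sub_self]
          simp
        have hseenB : pvSeenInv R C seen (pvP R C (d + 1) (pvLo C (d + 1))) := by
          refine pvSeenInv_congr hseen ?_
          intro i j hi hj
          apply Bool.eq_iff_iff.mpr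
          simp only [pvP, pvPr, hrho, hrho1]
          simp only [pvLo, Bool.or_eq_true, Bool.and_eq_true, decide_eq_true_eq]
          omega
        have e : R + C - 1 - d = (R + C - 1 - (d + 1)) + 1 := by omega
        have h1 : pvHi R (d + 1) + 1 ≤ R := by unfold pvHi; omega
        have hmuB : pvMu R C (d + 1) (pvLo C (d + 1)) ≤ N := by
          unfold pvMu at hmu ⊢
          rw [e, add_one_mul] at hmu
          generalize (R + C - 1 - (d + 1)) * (2 * (R + C)) = p at hmu ⊢
          omega
        have hfuelB : 4 * pvMu R C (d + 1) (pvLo C (d + 1)) ≤ fuel := by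
          unfold pvMu at hfuel ⊢
          rw [e, add_one_mul] at hfuel
          generalize (R + C - 1 - (d + 1)) * (2 * (R + C)) = p at hfuel ⊢
          omega
        rw [hq, ih (d + 1) (pvLo C (d + 1)) fuel seen values le_rfl
          (by unfold pvLo pvHi; omega) hD hmuB hfuelB hseenB, hrho1]
        rw [hrho, show pvHi R (d + 1) + 1 - min (d + 2) R = 0 from by omega,
          pvDiagsFrom_succ m R C (d + 2) hR1, pvDiagVals]
        simp [List.append_assoc]
      · -- last diagonal: the queue is empty and nothing remains
        have hq0 : pvQueue R C d a = [] := by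
          rw [pvQueue, hQempty1, hrho,
            show min (d + 2) R - pvLo C (d + 1) = 0 from by unfold pvLo; omega]
          simp
        rw [hq0, pvBfsLoop_nil, hrho,
          show pvHi R (d + 1) + 1 - min (d + 2) R = 0 from by omega,
          show pvDiagsFrom m R C (d + 2) = [] from by
            rw [pvDiagsFrom, show R + C - 1 - (d + 2) = 0 from by omega]; rfl]
        simp

lemma pvInnerEq (m : List (List Int)) (R C : Nat) (hR1 : 1 ≤ R) (k : Nat) :
    (PySem.List.pyRange (max 0 ((k : Int) - ((C : Int) - 1))) (min (k : Int) ((R : Int) - 1) + 1) 1).map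
      (fun r => pvMatGet m r ((k : Int) - r)) = pvDiagVals m R C k := by
  have ha : max 0 ((k : Int) - ((C : Int) - 1)) = ((pvLo C k : Nat) : Int) := by
    unfold pvLo; omega
  have hb : min (k : Int) ((R : Int) - 1) + 1 = ((pvHi R k + 1 : Nat) : Int) := by
    unfold pvHi; omega
  rw [ha, hb, PySem.List.pyRange_one, Int.toNat_sub]
  rw [pvDiagVals, List.range'_eq_map_range, List.map_map, List.map_map]
  apply List.map_congr_left
  intro x _
  simp only [Function.comp_apply]
  unfold pvMatGet pvVal
  have e1 : (((pvLo C k : Nat) : Int) + (x : Nat)).toNat = pvLo C k + x := by omega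
  have e2 : ((k : Int) - (((pvLo C k : Nat) : Int) + (x : Nat))).toNat = k - (pvLo C k + x) := by
    omega
  rw [e1, e2]

lemma pvAltEq (m : List (List Int)) (hm : m.length ≠ 0) :
    matrix_traversal_bfs_alt m = pvDiagsFrom m m.length (m.headD []).length 0 := by
  have hR1 : 1 ≤ m.length := by omega
  rw [matrix_traversal_bfs_alt, if_neg hm]
  simp only [PySem.List.foldl_append_singleton_eq_map]
  rw [PySem.List.foldl_append_eq_flatMap, PySem.List.pyRange_one]
  have hn : (((m.length : Int) + ((m.headD []).length : Int) - 1) - 0).toNat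
      = m.length + (m.headD []).length - 1 := by omega
  rw [hn]
  rw [pvDiagsFrom, ← List.range_eq_range', Nat.sub_zero]
  rw [List.flatMap_map]
  rw [List.nil_append]
  congr 1
  funext k
  simp only [zero_add]
  exact pvInnerEq m m.length (m.headD []).length hR1 k


-- ===== VERDICT (by name: the statement is the Claim_ definition above) =====
lemma pvSeenInv_zero (R C : Nat) :
    pvSeenInv R C ((List.range R).map (fun _ => (List.range C).map (fun _ => (0 : Int))))
      (fun _ _ => false) := by
  refine ⟨by simp, ?_, ?_⟩
  · intro i hi
    rw [List.getD_eq_getElem _ [] (by simpa using hi), List.getElem_map]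
    simp
  · intro i j hi hj
    rw [List.getD_eq_getElem _ [] (by simpa using hi), List.getElem_map,
      List.getD_eq_getElem _ 0 (by simpa using hj), List.getElem_map]
    simp

theorem matrix_traversal_bfs_spec : Claim_equal_matrix_traversal_bfs := by
  intro matrix _hdom _hpre
  unfold Spec_matrix_traversal_bfs
  by_cases hm : matrix.length = 0
  · rw [matrix_traversal_bfs, if_pos hm, matrix_traversal_bfs_alt, if_pos hm]
  · set R := matrix.length with hR
    set C := (matrix.headD []).length with hC
    have hR1 : 1 ≤ R := by omega
    rw [pvAltEq matrix hm]
    rw [matrix_traversal_bfs, if_neg hm]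
    rw [show 1 + 4 * ((R + C) * (2 * (R + C)) + R) = 4 * ((R + C) * (2 * (R + C)) + R) + 1 from by omega]
    rw [pvBfsLoop_cons]
    by_cases hC0 : C = 0
    · rw [if_pos (by right; right; right; left; omega), pvBfsLoop_nil]
      have hdv : ∀ d, pvDiagVals matrix R C d = [] := by
        intro d
        have h0 : pvHi R d + 1 - pvLo C d = 0 := by unfold pvHi pvLo; omega
        simp [pvDiagVals, h0]
      rw [pvDiagsFrom]
      rw [List.flatMap_eq_nil_iff.mpr (fun x _ => hdv x)]
    · have hC1 : 1 ≤ C := by omega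
      have hseen0 := pvSeenInv_zero R C
      have hget0 := pvSeenGet_inv hseen0 0 0 (by omega) (by omega)
      simp only [Nat.cast_zero] at hget0
      rw [if_neg (by push Not; refine ⟨by omega, by omega, by omega, by omega, by rw [hget0]; simp⟩)]
      have hlo0 : pvLo C 0 = 0 := by unfold pvLo; omega
      have hrho0 : pvRho R C 0 0 = pvLo C 1 := by rw [pvRho, if_pos hlo0.symm]
      have hq : ([] ++ [((0:Int) - 1, (0:Int)), ((0:Int), (0:Int) + 1), ((0:Int) + 1, (0:Int)), ((0:Int), (0:Int) - 1)])
          = pvQueue R C 0 0 := by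
        have h1 : pvHi R 0 + 1 - 0 = 1 := by unfold pvHi; omega
        have h2 : pvRho R C 0 0 - pvLo C 1 = 0 := by omega
        rw [pvQueue, h1, h2]
        simp [List.range', pvBlock]
      have hseen1 : pvSeenInv R C (pvSeenSet ((List.range R).map (fun _ => (List.range C).map (fun _ => (0 : Int)))) (0:Int) (0:Int)) (pvP R C 0 0) := by
        have hs := pvSeenInv_set hseen0 0 0 (by omega) (by omega)
        simp only [Nat.cast_zero] at hs
        refine pvSeenInv_congr hs ?_
        intro i j hi hj
        apply Bool.eq_iff_iff.mpr
        simp only [pvP, pvPr, hrho0, Bool.or_false, Bool.or_eq_true, Bool.and_eq_true,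
          decide_eq_true_eq, Bool.and_eq_true, beq_iff_eq]
        unfold pvLo
        omega
      rw [hq]
      rw [show pvMatGet matrix (0:Int) (0:Int) = pvVal matrix 0 0 from rfl]
      have hfuel : 4 * pvMu R C 0 0 ≤ 4 * ((R + C) * (2 * (R + C)) + R) := by
        have hmul : (R + C - 1 - 0) * (2 * (R + C)) ≤ (R + C) * (2 * (R + C)) :=
          Nat.mul_le_mul_right _ (by omega)
        have hhi : pvHi R 0 + 1 - 0 ≤ R := by unfold pvHi; omega
        unfold pvMu
        omega
      rw [pvStep matrix R C hR hC hR1 hC1 (pvMu R C 0 0) 0 0 (4 * ((R + C) * (2 * (R + C)) + R)) _ _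
        (by omega) (by omega) (by omega) le_rfl hfuel hseen1]
      rw [pvDiagsFrom_succ matrix R C 0 hR1, pvDiagsFrom_succ matrix R C 1 hR1]
      have hdv0 : pvDiagVals matrix R C 0 = [pvVal matrix 0 0] := by
        have h1 : pvHi R 0 + 1 - pvLo C 0 = 1 := by unfold pvHi pvLo; omega
        rw [pvDiagVals, h1, hlo0]
        simp [List.range']
      rw [hdv0, pvDiagVals, hrho0]
      simp
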